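/- GENERATED by mk_final_copies.py from the proof of the farm's unit `vorbis_decode_packet_rest.13` (farm:vorbis_decode_packet_rest.13.3: Lemmas.lean) as the
   re-elaboration sweep compiled it — do not edit. -/
import Asan.CheckWalk
import Vorbis.Spec.PacketRestFrame
import Vorbis.Spec.Units.vorbis_decode_packet_rest_13

/-!
  LEMMAS OF THE UNIT `vorbis_decode_packet_rest.13` (flush_packet; the `first_decode` arm; the discard arm).

      spans13 e                 the bytes segment .13 (with flush_packet) may write, as a literal list of windows over the memory of
                                the segment's entry state
      Geo13 / geo_of_at13         where `*f`, the stack and `*p_left` are (arithmetic), from the assertion `At13`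
      exit14                    THE EXIT ASSERTION `At14` from what a walk of the segment knows of its final state — UNDER THE
                                HYPOTHESIS `hoff` THAT `Args` DOES NOT GIVE (`*p_left` lies above the two stack arguments)
-/

open X86 X86.User Asan Vorbis Vorbis.Spec Vorbis.Spec.vorbis_decode_packet_rest

namespace Vorbis.Spec.vorbis_decode_packet_rest_13

set_option maxRecDepth 4000
set_option maxHeartbeats 4000000

/-- The bytes segment .13 may write, as windows over the memory of its entry state `v`: the stack below the steady rsp (return
addresses of the calls, flush_packet's frame), the spill slot `[rsp + 0x78]`, flush_packet's windows of `*f` widened by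
`first_decode` and `discard_samples_deferred`, `current_loc` / `current_loc_valid`, and the dword at `p_left`. -/
def spans13 (e : State) : List Span :=
  [⟨(e.reg .rsp).toNat - 3856, (e.reg .rsp).toNat - 3000⟩,
   ⟨(e.reg .rsp).toNat - 2880, (e.reg .rsp).toNat - 2876⟩,
   ⟨fOf e + 48, fOf e + 56⟩, ⟨fOf e + 84, fOf e + 96⟩, ⟨fOf e + 136, fOf e + 144⟩,
   ⟨fOf e + 1392, fOf e + 1400⟩, ⟨fOf e + 1484, fOf e + 1750⟩, ⟨fOf e + 1752, fOf e + 1764⟩,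
   ⟨fOf e + 1772, fOf e + 1788⟩, ⟨pLeftOf e, pLeftOf e + 4⟩]

/-- The entry stack pointer split so that no truncated subtraction is left (`omega` runs out of recursion depth on a context with
five terms `sp - c`): `sp = t + 3856`, and each `sp - c` of the segment as `t + c'`. -/
theorem sp_split (sp : Nat) (h : 0x700000 + 3856 ≤ sp) :
    ∃ t, sp = t + 3856 ∧ 0x700000 ≤ t ∧ sp - 3856 = t ∧ sp - 3000 = t + 856 ∧ sp - 2880 = t + 976 ∧
      sp - 2876 = t + 980 := by
  refine ⟨sp - 3856, ?_, ?_, rfl, ?_, ?_, ?_⟩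
  all_goals omega

/-- One more term of `sp_split`: the slot of the return addresses of the segment's calls. -/
theorem sp_split8 (sp t : Nat) (e0 : sp = t + 3856) : sp - 3008 = t + 848 := by
  omega

/-- **Where things are**, as arithmetic: the entry stack pointer, `*f` (an arena block: in the data space, off the stack region),
`*p_left` (a stack object of a caller: at or above `entry rsp + 8`). -/
structure Geo13 (e : State) : Prop where
  room : 0x700000 + 3856 ≤ (e.reg .rsp).toNat
  top : (e.reg .rsp).toNat + 8 ≤ 0x800000
  f_lo : 0x119d40 ≤ fOf e
  f_hi : fOf e + 1808 ≤ 0xC00000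
  f_off : fOf e + 1808 ≤ 0x700000 ∨ 0x800000 ≤ fOf e
  p_lo : (e.reg .rsp).toNat + 8 ≤ pLeftOf e
  p_hi : pLeftOf e + 4 ≤ 0x800000

variable {u₀ : State} {others : List Obj} {frames : List (Nat × FrameLayout)} {len : Nat} {Ar : Arena}
  {stored room : Int} {mode : Nat} {ysz : Nat → Nat} {e : State} {ret : Word} {v : State}

/-- `Geo13` from the entry assertion of the segment. -/
theorem geo_of_at13 (hat : At13 u₀ others frames len Ar stored room mode ysz e ret v) : Geo13 e := by
  have he_room : 0x700000 + 3856 ≤ (e.reg .rsp).toNat := hat.entry.room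
  have he_top : (e.reg .rsp).toNat + 8 ≤ 0x800000 := hat.entry.top
  obtain ⟨hsh, hinv, hargs⟩ := hat.pre
  have hw := hinv.objLive.where_ hsh.inv hsh.offText (by decide)
  have hoff := hinv.objOff
  simp only [Vorbis.Off.sizeof.stb_vorbis] at hw hoff
  have hp := hargs.left_obj.1.where_ hsh.inv hsh.offText (by decide)
  have hp1 := hargs.left_obj.2.1
  have hp2 := hargs.left_obj.2.2
  exact ⟨he_room, he_top, hw.1, hw.2.1, hoff, by omega, hp2⟩

/-- Membership in `spans13`, as a disjunction of equations. -/
theorem mem_spans13 (e : State) (w : Span) (hw : w ∈ spans13 e) :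
    w = ⟨(e.reg .rsp).toNat - 3856, (e.reg .rsp).toNat - 3000⟩ ∨
    w = ⟨(e.reg .rsp).toNat - 2880, (e.reg .rsp).toNat - 2876⟩ ∨
    w = ⟨fOf e + 48, fOf e + 56⟩ ∨ w = ⟨fOf e + 84, fOf e + 96⟩ ∨ w = ⟨fOf e + 136, fOf e + 144⟩ ∨
    w = ⟨fOf e + 1392, fOf e + 1400⟩ ∨ w = ⟨fOf e + 1484, fOf e + 1750⟩ ∨ w = ⟨fOf e + 1752, fOf e + 1764⟩ ∨
    w = ⟨fOf e + 1772, fOf e + 1788⟩ ∨ w = ⟨pLeftOf e, pLeftOf e + 4⟩ := by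
  simpa only [spans13, List.mem_cons, List.mem_nil_iff, or_false] using hw

/-- No window of the segment meets the shadow region. -/
theorem untouched13 (g : Geo13 e) {m m' : Mem} (hs : Mem.SameExcept (spans13 e) m m') : ShadowUntouched m m' := by
  obtain ⟨g1, g2, g3, g4, g5, g6, g7⟩ := g
  obtain ⟨t, e0, ht, e1, e2, e3, e4⟩ := sp_split _ g1
  apply hs.eqOn
  intro w hw
  rcases mem_spans13 e w hw with rfl | rfl | rfl | rfl | rfl | rfl | rfl | rfl | rfl | rfl
  all_goals simp only [e1, e2, e3, e4]
  all_goals omega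

/-- **A stack slot of the frame (or a stack argument below `*p_left`) reads the same after the segment's stores**: the `k` bytes at
`a` (`x` as a number) lie at or above the steady rsp, miss the spill slot `[rsp + 0x78]`, and end at or below `*p_left`. -/
theorem slot13 (g : Geo13 e) {m m' : Mem} (hs : Mem.SameExcept (spans13 e) m m') (a : Word) (k x : Nat) (hx : a.toNat = x)
    (h1 : (e.reg .rsp).toNat - 3000 ≤ x)
    (h2 : x + k ≤ (e.reg .rsp).toNat - 2880 ∨ (e.reg .rsp).toNat - 2876 ≤ x)
    (h3 : x + k ≤ pLeftOf e) : m'.readLE a k = m.readLE a k := by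
  obtain ⟨g1, g2, g3, g4, g5, g6, g7⟩ := g
  have hlt : a.toNat + k < 2 ^ 64 := by omega
  apply hs.readLE a k hlt
  rw [hx]
  clear hlt hx
  obtain ⟨t, e0, ht, e1, e2, e3, e4⟩ := sp_split _ g1
  simp only [e2, e3, e4] at h1 h2
  intro w hw
  rcases mem_spans13 e w hw with rfl | rfl | rfl | rfl | rfl | rfl | rfl | rfl | rfl | rfl
  all_goals simp only [e1, e2, e3, e4]
  all_goals omega

/-- Every window of the segment is a decode-time store for the memory of the segment's entry. -/
theorem storeOK13 (hat : At13 u₀ others frames len Ar stored room mode ysz e ret v) (s : Span) (hs : s ∈ spans13 e) :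
    StoreOK (RunBlk Ar len) v.mem (fOf e) s := by
  obtain ⟨g1, g2, g3, g4, g5, g6, g7⟩ := geo_of_at13 hat
  obtain ⟨t, e0, ht, e1, e2, e3, e4⟩ := sp_split _ g1
  have hstack : ∀ lo hi : Nat, 0x700000 ≤ lo → hi ≤ 0x800000 → StoreOK (RunBlk Ar len) v.mem (fOf e) ⟨lo, hi⟩ := by
    intro lo hi h1 h2
    apply StoreOK.off
    intro B hB
    have := hat.inv.offStack B hB
    simp only []
    omega
  have hhole : ∀ lo hi : Nat, InHole (fOf e) ⟨lo, hi⟩ → StoreOK (RunBlk Ar len) v.mem (fOf e) ⟨lo, hi⟩ :=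
    fun lo hi h => StoreOK.hole h
  rcases mem_spans13 e s hs with rfl | rfl | rfl | rfl | rfl | rfl | rfl | rfl | rfl | rfl
  · rw [e1, e2]
    exact hstack _ _ (by omega) (by omega)
  · rw [e3, e4]
    exact hstack _ _ (by omega) (by omega)
  all_goals first
    | (apply hhole; unfold InHole; simp only []; omega)
    | exact hstack _ _ (by omega) (by omega)

/-- Every byte of a window of the segment is a byte the function may write (`Covered`: the `hsub` of
`Mem.SameExcept.step_same` when `Frame.same` is extended). -/
theorem covered13 (g : Geo13 e) (Ar : Arena) (ysz : Nat → Nat) (w : Span) (hw : w ∈ spans13 e) (a : Nat) (h1 : w.lo ≤ a)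
    (h2 : a < w.hi) : Covered Ar ysz e a := by
  obtain ⟨g1, g2, g3, g4, g5, g6, g7⟩ := g
  have hole : ∀ s, s ∈ holes (fOf e) → s.lo ≤ a → a < s.hi → Covered Ar ysz e a :=
    fun s hs k1 k2 => Or.inr (Or.inl ⟨s, hs, k1, k2⟩)
  obtain ⟨t, e0, ht, e1, e2, e3, e4⟩ := sp_split _ g1
  rcases mem_spans13 e w hw with rfl | rfl | rfl | rfl | rfl | rfl | rfl | rfl | rfl | rfl <;> simp only [] at h1 h2
  · rw [e1] at h1
    rw [e2] at h2
    exact Or.inl ⟨by omega, by omega⟩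
  · rw [e3] at h1
    rw [e4] at h2
    exact Or.inl ⟨by omega, by omega⟩
  · exact hole ⟨fOf e + 48, fOf e + 56⟩ (by simp [holes]) (by simp only []; omega) (by simp only []; omega)
  · exact hole ⟨fOf e + 80, fOf e + 112⟩ (by simp [holes]) (by simp only []; omega) (by simp only []; omega)
  · exact hole ⟨fOf e + 132, fOf e + 144⟩ (by simp [holes]) (by simp only []; omega) (by simp only []; omega)
  · exact hole ⟨fOf e + 1392, fOf e + 1400⟩ (by simp [holes]) (by simp only []; omega) (by simp only []; omega)
  · exact hole ⟨fOf e + 1480, fOf e + 1808⟩ (by simp [holes]) (by simp only []; omega) (by simp only []; omega)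
  · exact hole ⟨fOf e + 1480, fOf e + 1808⟩ (by simp [holes]) (by simp only []; omega) (by simp only []; omega)
  · exact hole ⟨fOf e + 1480, fOf e + 1808⟩ (by simp [holes]) (by simp only []; omega) (by simp only []; omega)
  · exact Or.inr (Or.inr (Or.inr (Or.inr (Or.inr (Or.inr (Or.inl ⟨h1, h2⟩))))))

/-! ### The tail's arithmetic -/

/-- The signed reading of the value of a 32-bit vector is its two's-complement value. -/
theorem sint32_toNat (x : BitVec 32) : sint32 x.toNat = x.toInt := by
  rw [BitVec.toInt_eq_toNat_cond]
  have := x.isLt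
  unfold sint32
  split <;> split <;> omega

/-- **What the tail's arithmetic starts from**, all in the memory of the segment's entry: HD3 as arithmetic, W2 of the decoded mode
for `(left_start, ·, right_start, right_end)` with `n` the value of the slot `[rsp + 0x50]`, and W1. -/
theorem tail_facts (hat : At13 u₀ others frames len Ar stored room mode ysz e ret v) :
    ∃ le : Int, HD3v (stb_vorbis.blocksize_0 v.mem (fOf e)) (stb_vorbis.blocksize_1 v.mem (fOf e)) ∧
      W2 (stb_vorbis.blocksize_0 v.mem (fOf e)) (stb_vorbis.blocksize_1 v.mem (fOf e))
        ((nOf v.mem (fOf e) (mOf e) : Nat) : Int) (lsOf e) le (rsOf e) (reOf e) ∧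
      0 ≤ stb_vorbis.discard_samples_deferred v.mem (fOf e) ∧
      stb_vorbis.discard_samples_deferred v.mem (fOf e) ≤
        (stb_vorbis.blocksize_1 v.mem (fOf e) - stb_vorbis.blocksize_0 v.mem (fOf e)) / 4 := by
  obtain ⟨hsh, hinv, hargs⟩ := hat.pre
  have hds : DecodeSame (fOf e) e.mem v.mem :=
    StoreOK.decodeSame hinv.ok hinv.ob1 hinv.sep hat.same (fun s hs => footprint_storeOK hat.pre hat.entry.room s hs)
  have eb0 : stb_vorbis.blocksize_0 v.mem (fOf e) = stb_vorbis.blocksize_0 e.mem (fOf e) := by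
    simp only [vacc, voff]
    exact hds.i32 152 (by decide)
  have eb1 : stb_vorbis.blocksize_1 v.mem (fOf e) = stb_vorbis.blocksize_1 e.mem (fOf e) := by
    simp only [vacc, voff]
    exact hds.i32 156 (by decide)
  have hmode : mode < 64 := hinv.fb.vorbis.mode.mode_index_lt hargs.mode_lt
  have hm := hargs.m_eq
  have ebf : Mode.blockflag v.mem (mOf e) = Mode.blockflag e.mem (mOf e) := by
    simp only [vacc, voff] at hm ⊢
    exact hds.u8_at (484 + 6 * mode) (InWins.of_mem (144, 1000) (by decide) (by simp only []; omega) (by simp only []; omega))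
      (by omega) (by omega)
  have hv := hat.inv.fb.vorbis
  have hd3 : HD3v (stb_vorbis.blocksize_0 v.mem (fOf e)) (stb_vorbis.blocksize_1 v.mem (fOf e)) :=
    HD3.hd3v (HeaderOK.HD3 hv.header)
  obtain ⟨le, hw2⟩ := hargs.w2
  have en : nIntOf e.mem (fOf e) (mOf e) = ((nOf v.mem (fOf e) (mOf e) : Nat) : Int) := by
    have h0 := hd3.lo
    have h1 := hd3.le
    unfold nIntOf nOf bsize
    rw [ebf, ← eb0, ← eb1]
    split <;> omega
  rw [en, ← eb0, ← eb1] at hw2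
  exact ⟨le, hd3, hw2, hv.w1.nonneg, hv.w1.le⟩

/-- **THE EXIT ASSERTION OF SEGMENT .13 FROM WHAT A WALK KNOWS OF ITS FINAL STATE `w`** (0x1119bc, `cut41`): the machine facts (rip,
rsp, r13, the text, DF / MXCSR), the footprint since the segment's entry (`hsame`: only windows of `spans13` were written), `Bits`
(flush_packet's post carried over the tail's stores), the new `discard_samples_deferred` within W1's bounds, the new `left'` in the
slot `[rsp + 0x78]` and at `*p_left` with its four bounds (`Discard.sound`), `first_decode = 0`, `bytes_in_seg = 0`.

`hoff` IS THE FACT THE CONTRACT DOES NOT GIVE: `*p_left` lies above the two stack arguments `[entry rsp + 8, entry rsp + 24)`.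
`Args.left_obj` (with `LiveIn.where_`) gives `entry rsp + 8 ≤ p_left` only; without `hoff` the store `*p_left = left_start` may
overwrite `right_end` / `p_left` themselves, and `Stable.arg_re` / `Stable.arg_left` of the exit assertion cannot be shown. -/
theorem exit14 (hat : At13 u₀ others frames len Ar stored room mode ysz e ret v) {w : State} {left' : Int}
    (hoff : (e.reg .rsp).toNat + 24 ≤ pLeftOf e)
    (hsame : Mem.SameExcept (spans13 e) v.mem w.mem)
    (hrip : w.rip = Vorbis.L.vorbis_decode_packet_rest.cut41)
    (hrsp : w.reg .rsp = e.reg .rsp - 3000)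
    (hcode : Vorbis.CodeOK u₀ w.mem)
    (habi : abiInv w)
    (hr13 : (w.reg .r13).toNat = sbOf e)
    (hbits : Bits (RunBlk Ar len) len w.mem (fOf e))
    (hd0 : 0 ≤ stb_vorbis.discard_samples_deferred w.mem (fOf e))
    (hd1 : stb_vorbis.discard_samples_deferred w.mem (fOf e) ≤
      (stb_vorbis.blocksize_1 v.mem (fOf e) - stb_vorbis.blocksize_0 v.mem (fOf e)) / 4)
    (hslot : sint32 (w.mem.readLE (e.reg .rsp - 2880) 4) = left')
    (hleft : w.mem.i32 (pLeftOf e) = left')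
    (hl0 : 0 ≤ left') (hl1 : left' ≤ stb_vorbis.blocksize_1 v.mem (fOf e) / 2)
    (hl2 : lsOf e ≤ left') (hl3 : left' ≤ rsOf e)
    (hfirst : stb_vorbis.first_decode w.mem (fOf e) = 0)
    (hdr : stb_vorbis.bytes_in_seg w.mem (fOf e) = 0) :
    At14 u₀ others frames len Ar stored room mode ysz e ret w := by
  have g := geo_of_at13 hat
  have ⟨g1, g2, g3, g4, g5, g6, g7⟩ := g
  obtain ⟨t, e0, ht, e1, e2, e3, e4⟩ := sp_split _ g1
  -- the stack slots: each reads as at the segment's entry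
  have k_ra : w.mem.readLE (e.reg .rsp) 8 = v.mem.readLE (e.reg .rsp) 8 :=
    slot13 g hsame _ 8 (e.reg .rsp).toNat rfl (by omega) (by omega) (by omega)
  have k_r15 : w.mem.readLE (e.reg .rsp - 8) 8 = v.mem.readLE (e.reg .rsp - 8) 8 :=
    slot13 g hsame _ 8 (t + 3848) (by u_omega) (by omega) (by omega) (by omega)
  have k_r14 : w.mem.readLE (e.reg .rsp - 16) 8 = v.mem.readLE (e.reg .rsp - 16) 8 :=
    slot13 g hsame _ 8 (t + 3840) (by u_omega) (by omega) (by omega) (by omega)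
  have k_r13 : w.mem.readLE (e.reg .rsp - 24) 8 = v.mem.readLE (e.reg .rsp - 24) 8 :=
    slot13 g hsame _ 8 (t + 3832) (by u_omega) (by omega) (by omega) (by omega)
  have k_r12 : w.mem.readLE (e.reg .rsp - 32) 8 = v.mem.readLE (e.reg .rsp - 32) 8 :=
    slot13 g hsame _ 8 (t + 3824) (by u_omega) (by omega) (by omega) (by omega)
  have k_rbp : w.mem.readLE (e.reg .rsp - 40) 8 = v.mem.readLE (e.reg .rsp - 40) 8 :=
    slot13 g hsame _ 8 (t + 3816) (by u_omega) (by omega) (by omega) (by omega)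
  have k_rbx : w.mem.readLE (e.reg .rsp - 48) 8 = v.mem.readLE (e.reg .rsp - 48) 8 :=
    slot13 g hsame _ 8 (t + 3808) (by u_omega) (by omega) (by omega) (by omega)
  have k_f : slot64 e w 0x40 = slot64 e v 0x40 :=
    slot13 g hsame _ 8 (t + 920) (by u_omega) (by omega) (by omega) (by omega)
  have k_len : slot64 e w 0x68 = slot64 e v 0x68 :=
    slot13 g hsame _ 8 (t + 960) (by u_omega) (by omega) (by omega) (by omega)
  have k_m : slot64 e w 0x70 = slot64 e v 0x70 :=
    slot13 g hsame _ 8 (t + 968) (by u_omega) (by omega) (by omega) (by omega)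
  have k_rs : slot32 e w 0x7c = slot32 e v 0x7c :=
    slot13 g hsame _ 4 (t + 980) (by u_omega) (by omega) (by omega) (by omega)
  have k_n : slot32 e w 0x50 = slot32 e v 0x50 :=
    slot13 g hsame _ 4 (t + 936) (by u_omega) (by omega) (by omega) (by omega)
  have k_n2 : slot32 e w 0x3c = slot32 e v 0x3c :=
    slot13 g hsame _ 4 (t + 916) (by u_omega) (by omega) (by omega) (by omega)
  have k_sb : slot64 e w 0x60 = slot64 e v 0x60 :=
    slot13 g hsame _ 8 (t + 952) (by u_omega) (by omega) (by omega) (by omega)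
  have k_re : w.mem.readLE (e.reg .rsp + 8) 4 = v.mem.readLE (e.reg .rsp + 8) 4 :=
    slot13 g hsame _ 4 (t + 3864) (by u_omega) (by omega) (by omega) (by omega)
  have k_pl : w.mem.readLE (e.reg .rsp + 16) 8 = v.mem.readLE (e.reg .rsp + 16) 8 :=
    slot13 g hsame _ 8 (t + 3872) (by u_omega) (by omega) (by omega) (by omega)
  have k_78 : slot32 e w 0x78 = w.mem.readLE (e.reg .rsp - 2880) 4 := by
    have ea : spOf e + 0x78 = e.reg .rsp - 2880 := by u_omega
    unfold slot32
    rw [ea]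
  have hinv0 := hat.inv
  have hv := hinv0.fb.vorbis
  -- the shadow layer: no window meets the shadow region
  have hun : ShadowUntouched v.mem w.mem := untouched13 g hsame
  have hshadow : ShadowInv others (framesIn frames e) (spOf e).toNat w.mem := hat.shadow.untouched hun
  -- `*f` outside its decode-time holes reads the same
  have hds : DecodeSame (fOf e) v.mem w.mem :=
    StoreOK.decodeSame hinv0.ok hinv0.ob1 hinv0.sep hsame (storeOK13 hat)
  have eb0 : stb_vorbis.blocksize_0 w.mem (fOf e) = stb_vorbis.blocksize_0 v.mem (fOf e) := by
    simp only [vacc, voff]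
    exact hds.i32 152 (by decide)
  have eb1 : stb_vorbis.blocksize_1 w.mem (fOf e) = stb_vorbis.blocksize_1 v.mem (fOf e) := by
    simp only [vacc, voff]
    exact hds.i32 156 (by decide)
  -- the MUTABLE part of the invariant in the new memory: W1, M7, ADO, the environment of a check site
  have hw1 : W1 w.mem (fOf e) := by
    constructor
    · exact hd0
    · rw [eb0, eb1]
      exact hd1
  have hf64 : fOf e + Off.sizeof.stb_vorbis ≤ 2 ^ 64 := by
    simp only [voff]
    omega
  have h7 : Mdct.M7Range w.mem (fOf e) := by
    apply hv.buffers.M7.transfer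
    apply ObjEq.of_sameExcept hsame
    · intro x hx
      simp only [Mdct.M7Range.wins, List.mem_cons, List.mem_nil_iff, or_false] at hx
      rcases hx with rfl | rfl <;> simp only [] <;> omega
    · intro x hx s hs
      simp only [Mdct.M7Range.wins, List.mem_cons, List.mem_nil_iff, or_false] at hx
      rcases mem_spans13 e s hs with rfl | rfl | rfl | rfl | rfl | rfl | rfl | rfl | rfl | rfl <;>
        rcases hx with rfl | rfl <;> simp only [e1, e2, e3, e4] <;> omega
  have hado : ADO Ar others w.mem (fOf e) := by
    apply ADO.frame_stores hinv0.fb.ado hsame hf64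
    · intro s hs
      rcases mem_spans13 e s hs with rfl | rfl | rfl | rfl | rfl | rfl | rfl | rfl | rfl | rfl <;>
        simp only [e1, e2, e3, e4] <;> omega
    · intro s hs
      rcases mem_spans13 e s hs with rfl | rfl | rfl | rfl | rfl | rfl | rfl | rfl | rfl | rfl <;>
        simp only [e1, e2, e3, e4] <;> omega
  have henv : Env (RunBlk Ar len) (Asan.Live (stackObjs (framesIn frames e) ++ others)) w.mem :=
    ⟨hshadow.covers, hinv0.ok, hinv0.live⟩
  have hinv' : DecodeInv others (framesIn frames e) len Ar stored room ysz w.mem (fOf e) :=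
    hinv0.frame_stores hsame (storeOK13 hat) henv hado (fun _ => hbits) (fun _ => h7) (fun _ => hw1)
  -- the function's footprint so far
  have hsame' : Mem.SameExcept ((vorbis_decode_packet_rest.spec others frames len Ar stored room mode ysz).footprint e)
      e.mem w.mem :=
    hat.same.step_same hsame (fun s hs a h1 h2 =>
      covered_footprint others frames len Ar stored room mode ysz e a (covered13 g Ar ysz s hs a h1 h2))
  -- `n` and the mode's blockflag read the same
  have hmode : mode < 64 := hat.pre.2.1.fb.vorbis.mode.mode_index_lt hat.pre.2.2.mode_lt
  have hm := hat.pre.2.2.m_eq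
  have ebf : Mode.blockflag w.mem (mOf e) = Mode.blockflag v.mem (mOf e) := by
    simp only [vacc, voff] at hm ⊢
    exact hds.u8_at (484 + 6 * mode) (InWins.of_mem (144, 1000) (by decide) (by simp only []; omega) (by simp only []; omega))
      (by omega) (by omega)
  have en : nOf w.mem (fOf e) (mOf e) = nOf v.mem (fOf e) (mOf e) := by
    unfold nOf
    rw [ebf]
    exact bsize_congr eb0 eb1 _
  -- the exit assertion, field by field
  refine ⟨left', ⟨⟨⟨hat.entry, hat.pre, hrsp, hcode, habi, hsame', ?_, ?_, ?_, ?_, ?_, ?_, ?_, hshadow, hinv'⟩,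
    ?_, ?_, ?_, ?_, ?_, ?_, ?_, ?_, ?_, ?_, hleft⟩, hrip, hr13, hl0, ?_, hl2, hl3, hfirst, hdr⟩⟩
  · rw [k_ra]
    exact hat.ra
  · rw [k_r15]
    exact hat.s_r15
  · rw [k_r14]
    exact hat.s_r14
  · rw [k_r13]
    exact hat.s_r13
  · rw [k_r12]
    exact hat.s_r12
  · rw [k_rbp]
    exact hat.s_rbp
  · rw [k_rbx]
    exact hat.s_rbx
  · rw [k_f]
    exact hat.slot_f
  · rw [k_len]
    exact hat.slot_len
  · rw [k_m]
    exact hat.slot_m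
  · rw [k_78]
    exact hslot
  · rw [k_rs]
    exact hat.slot_rs
  · rw [k_n, en]
    exact hat.slot_n
  · rw [k_n2, en]
    exact hat.slot_n2
  · rw [k_sb]
    exact hat.slot_sb
  · rw [k_re]
    exact hat.arg_re
  · rw [k_pl]
    exact hat.arg_left
  · rw [eb1]
    exact hl1

/-- A field of `*f` at a numeral offset: the number address of the typed reads is the walker's `rdi + k`. -/
theorem addr_field (r : Word) (k : Nat) : addr (r.toNat + k) = r + UInt64.ofNat k := by
  rw [← addr_add, addr_toNat]

/-! ### The three arms that write, as cases of `Discard` (the walker's 32-bit values against the invariant's integers) -/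

/-- `sub r32, r32` without signed overflow. -/
theorem toInt_sub (x y : BitVec 32) (h1 : -2147483648 ≤ x.toInt - y.toInt) (h2 : x.toInt - y.toInt < 2147483648) :
    (x - y).toInt = x.toInt - y.toInt := by
  rw [← sint32_toNat (x - y), ← sint32_toNat x, ← sint32_toNat y] at *
  rw [BitVec.toNat_sub]
  have hx := x.isLt
  have hy := y.isLt
  generalize x.toNat = a at *
  generalize y.toNat = b at *
  rcases sint32_cases a with ⟨c1, c2⟩ | ⟨c1, c2⟩ <;> rcases sint32_cases b with ⟨c3, c4⟩ | ⟨c3, c4⟩ <;>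
    rcases sint32_cases ((2 ^ 32 - b + a) % 2 ^ 32) with ⟨c5, c6⟩ | ⟨c5, c6⟩ <;> omega

/-- `add r32, r32` without signed overflow. -/
theorem toInt_add (x y : BitVec 32) (h1 : -2147483648 ≤ x.toInt + y.toInt) (h2 : x.toInt + y.toInt < 2147483648) :
    (x + y).toInt = x.toInt + y.toInt := by
  rw [← sint32_toNat (x + y), ← sint32_toNat x, ← sint32_toNat y] at *
  rw [BitVec.toNat_add]
  have hx := x.isLt
  have hy := y.isLt
  generalize x.toNat = a at *
  generalize y.toNat = b at *
  rcases sint32_cases a with ⟨c1, c2⟩ | ⟨c1, c2⟩ <;> rcases sint32_cases b with ⟨c3, c4⟩ | ⟨c3, c4⟩ <;>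
    rcases sint32_cases ((a + b) % 2 ^ 32) with ⟨c5, c6⟩ | ⟨c5, c6⟩ <;> omega

/-- The value `mov [rax], ebx` stores after `mov ebx, [rsp + 0x78]` re-read the sum: the sum itself. -/
theorem ofNat32_toNat_mod (x : BitVec 32) : (BitVec.ofNat 32 (x.toNat % 4294967296)).toNat = x.toNat := by
  have hx := x.isLt
  rw [BitVec.toNat_ofNat]
  omega

/-- The arm `first_decode ≠ 0` (0x111966 … 0x1119b4): `discard_samples_deferred = n − right_end`; `left_start` stays. -/
theorem dis_first (n re ls : Nat) (bn : n < 2 ^ 32) (bre : re < 2 ^ 32) (N L R RE Dv : Int) (hN : N = (n : Int))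
    (hRE : RE = sint32 re) (hL : L = sint32 ls) (h3 : 0 ≤ RE) (h4 : RE ≤ N) (h5 : N ≤ 8192) :
    Discard N L R RE true Dv (sint32 (BitVec.ofNat 32 n - BitVec.ofNat 32 re).toNat) (sint32 ls) := by
  have e1 := Vorbis.toInt_ofNat32 n bn
  have e2 := Vorbis.toInt_ofNat32 re bre
  have hn : sint32 n = (n : Int) := by
    rcases sint32_cases n with ⟨c1, c2⟩ | ⟨c1, c2⟩ <;> omega
  have e3 : (BitVec.ofNat 32 n - BitVec.ofNat 32 re).toInt = N - RE := by
    rw [toInt_sub _ _ (by omega) (by omega), e1, e2, hn, hN, hRE]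
  rw [sint32_toNat, e3, ← hL]
  exact Discard.first Dv

/-- The arm `d ≥ right_start − left_start` (0x111acf … 0x111af2): `d −= right_start − left_start`, `left_start = right_start`. -/
theorem dis_all (d rs ls : Nat) (bd : d < 2 ^ 32) (brs : rs < 2 ^ 32) (bls : ls < 2 ^ 32) (N L R RE Dv : Int)
    (hDv : Dv = sint32 d) (hR : R = sint32 rs) (hL : L = sint32 ls) (h0 : 0 ≤ L) (h1 : L ≤ R) (h2 : R ≤ 8192) (h5 : 0 ≤ Dv)
    (h6 : Dv ≤ 8192) (hne : ¬d % 4294967296 = 0)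
    (hbr : ¬(BitVec.ofNat 32 d).toInt < (BitVec.ofNat 32 rs - BitVec.ofNat 32 ls).toInt) :
    Discard N L R RE false Dv (sint32 (BitVec.ofNat 32 d - (BitVec.ofNat 32 rs - BitVec.ofNat 32 ls)).toNat)
      (sint32 (BitVec.ofNat 32 rs).toNat) := by
  have e1 := Vorbis.toInt_ofNat32 d bd
  have e2 := Vorbis.toInt_ofNat32 rs brs
  have e3 := Vorbis.toInt_ofNat32 ls bls
  have e4 : (BitVec.ofNat 32 rs - BitVec.ofNat 32 ls).toInt = R - L := by
    rw [toInt_sub _ _ (by omega) (by omega), e2, e3, hR, hL]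
  have e5 : (BitVec.ofNat 32 d - (BitVec.ofNat 32 rs - BitVec.ofNat 32 ls)).toInt = Dv - (R - L) := by
    rw [toInt_sub _ _ (by omega) (by omega), e4, e1, hDv]
  rw [e4, e1, ← hDv] at hbr
  rw [sint32_toNat, sint32_toNat, e5, e2, ← hR]
  refine Discard.all Dv ?_ (by omega)
  rcases sint32_cases d with ⟨c1, c2⟩ | ⟨c1, c2⟩ <;> omega

/-- The arm `d < right_start − left_start` (0x111af7 … 0x111b25): `left_start += d`, `d = 0`. -/
theorem dis_part (d rs ls : Nat) (bd : d < 2 ^ 32) (brs : rs < 2 ^ 32) (bls : ls < 2 ^ 32) (N L R RE Dv : Int)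
    (hDv : Dv = sint32 d) (hR : R = sint32 rs) (hL : L = sint32 ls) (h0 : 0 ≤ L) (h1 : L ≤ R) (h2 : R ≤ 8192) (h5 : 0 ≤ Dv)
    (h6 : Dv ≤ 8192) (hne : ¬d % 4294967296 = 0)
    (hbr : (BitVec.ofNat 32 d).toInt < (BitVec.ofNat 32 rs - BitVec.ofNat 32 ls).toInt) :
    Discard N L R RE false Dv (sint32 0) (sint32 (BitVec.ofNat 32 ls + BitVec.ofNat 32 d).toNat) := by
  have e1 := Vorbis.toInt_ofNat32 d bd
  have e2 := Vorbis.toInt_ofNat32 rs brs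
  have e3 := Vorbis.toInt_ofNat32 ls bls
  have e4 : (BitVec.ofNat 32 rs - BitVec.ofNat 32 ls).toInt = R - L := by
    rw [toInt_sub _ _ (by omega) (by omega), e2, e3, hR, hL]
  have e5 : (BitVec.ofNat 32 ls + BitVec.ofNat 32 d).toInt = L + Dv := by
    rw [toInt_add _ _ (by omega) (by omega), e3, e1, hL, hDv]
  rw [e4, e1, ← hDv] at hbr
  have z : sint32 0 = 0 := by decide
  rw [sint32_toNat, e5, z]
  refine Discard.part Dv ?_ hbr
  rcases sint32_cases d with ⟨c1, c2⟩ | ⟨c1, c2⟩ <;> omega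

/-- The ranges of the tail's integers (W2 with HD3, W1): what excludes 32-bit overflow in the three arms. -/
theorem tail_bounds (hat : At13 u₀ others frames len Ar stored room mode ysz e ret v) :
    0 ≤ lsOf e ∧ lsOf e ≤ rsOf e ∧ rsOf e ≤ 8192 ∧ 0 ≤ reOf e ∧
      reOf e ≤ ((nOf v.mem (fOf e) (mOf e) : Nat) : Int) ∧ ((nOf v.mem (fOf e) (mOf e) : Nat) : Int) ≤ 8192 ∧
      0 ≤ stb_vorbis.discard_samples_deferred v.mem (fOf e) ∧ stb_vorbis.discard_samples_deferred v.mem (fOf e) ≤ 8192 := by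
  obtain ⟨le, hd3, hw2, h0, h1⟩ := tail_facts hat
  have hwb := hw2.bounds hd3
  have c1 := hd3.hi
  have c2 := hd3.lo
  have c3 := hd3.le
  generalize stb_vorbis.blocksize_0 v.mem (fOf e) = b0 at *
  generalize stb_vorbis.blocksize_1 v.mem (fOf e) = b1 at *
  generalize stb_vorbis.discard_samples_deferred v.mem (fOf e) = dv at *
  generalize ((nOf v.mem (fOf e) (mOf e) : Nat) : Int) = N at *
  clear hw2 hd3
  omega

/-- The bytes the tail (after flush_packet) may write, over the memory flush_packet returned: the return addresses of the check
calls, the slot `[rsp + 0x78]`, `current_loc` / `current_loc_valid`, `first_decode`, `discard_samples_deferred`, `*p_left`. -/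
def tail13 (e : State) : List Span :=
  [⟨(e.reg .rsp).toNat - 3008, (e.reg .rsp).toNat - 3000⟩,
   ⟨(e.reg .rsp).toNat - 2880, (e.reg .rsp).toNat - 2876⟩,
   ⟨fOf e + 1392, fOf e + 1400⟩, ⟨fOf e + 1749, fOf e + 1750⟩, ⟨fOf e + 1784, fOf e + 1788⟩,
   ⟨pLeftOf e, pLeftOf e + 4⟩]

/-- **`Bits` over the tail's stores**: none of them meets the four windows `Bits` reads. -/
theorem bits_tail (g : Geo13 e) {Blk : Block → Prop} {len : Nat} {m1 mw : Mem} (hb : Bits Blk len m1 (fOf e))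
    (hs : Mem.SameExcept (tail13 e) m1 mw) : Bits Blk len mw (fOf e) := by
  obtain ⟨g1, g2, g3, g4, g5, g6, g7⟩ := g
  obtain ⟨t, e0, ht, _, e2, e3, e4⟩ := sp_split _ g1
  have hmem : ∀ w, w ∈ tail13 e → w = ⟨t + 848, t + 856⟩ ∨ w = ⟨t + 976, t + 980⟩ ∨ w = ⟨fOf e + 1392, fOf e + 1400⟩ ∨
      w = ⟨fOf e + 1749, fOf e + 1750⟩ ∨ w = ⟨fOf e + 1784, fOf e + 1788⟩ ∨ w = ⟨pLeftOf e, pLeftOf e + 4⟩ := by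
    intro w hw
    have e5 : (e.reg .rsp).toNat - 3008 = t + 848 := sp_split8 _ t e0
    simpa only [tail13, e5, e2, e3, e4, List.mem_cons, List.mem_nil_iff, or_false] using hw
  apply hb.frame_fields
  apply Bits.SameFields.of_sameExcept hs
  all_goals
    intro w hw
    rcases hmem w hw with rfl | rfl | rfl | rfl | rfl | rfl <;> simp only [] <;> omega

/-- The signed reading determines a 32-bit value. -/
theorem sint32_inj (a b : Nat) (ha : a < 2 ^ 32) (hb : b < 2 ^ 32) (h : sint32 a = sint32 b) : a = b := by
  rcases sint32_cases a with ⟨c1, c2⟩ | ⟨c1, c2⟩ <;> rcases sint32_cases b with ⟨c3, c4⟩ | ⟨c3, c4⟩ <;> omega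

/-- **The values the tail loads, as the invariant's numbers**: `n` is `blocksize[m->blockflag]`; `right_end`, `right_start`,
`left_start`, `discard_samples_deferred` are the signed readings of the loaded dwords; `*p_left` holds the dword of the slot
`[rsp + 0x78]`. -/
theorem vals13 (hat : At13 u₀ others frames len Ar stored room mode ysz e ret v) {n re rs ls d lv : Nat}
    (hn : v.mem.readLE (e.reg .rsp - 2920) 4 = n) (hre : v.mem.readLE (e.reg .rsp + 8) 4 = re)
    (hrs : v.mem.readLE (e.reg .rsp - 2876) 4 = rs) (hls : v.mem.readLE (e.reg .rsp - 2880) 4 = ls)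
    (hd : v.mem.readLE (e.reg .rdi + 1784) 4 = d) (hlv : v.mem.readLE (UInt64.ofNat (pLeftOf e)) 4 = lv) :
    nOf v.mem (fOf e) (mOf e) = n ∧ reOf e = sint32 re ∧ rsOf e = sint32 rs ∧ lsOf e = sint32 ls ∧
      stb_vorbis.discard_samples_deferred v.mem (fOf e) = sint32 d ∧ lv = ls ∧
      n < 2 ^ 32 ∧ re < 2 ^ 32 ∧ rs < 2 ^ 32 ∧ ls < 2 ^ 32 ∧ d < 2 ^ 32 := by
  have g1 := (geo_of_at13 hat).room
  have b1 := Mem.readLE_lt' v.mem (e.reg .rsp - 2920) 4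
  have b2 := Mem.readLE_lt' v.mem (e.reg .rsp + 8) 4
  have b3 := Mem.readLE_lt' v.mem (e.reg .rsp - 2876) 4
  have b4 := Mem.readLE_lt' v.mem (e.reg .rsp - 2880) 4
  have b5 := Mem.readLE_lt' v.mem (e.reg .rdi + 1784) 4
  have b6 := Mem.readLE_lt' v.mem (UInt64.ofNat (pLeftOf e)) 4
  rw [hn] at b1
  rw [hre] at b2
  rw [hrs] at b3
  rw [hls] at b4
  rw [hd] at b5
  rw [hlv] at b6
  have a1 : spOf e + 0x50 = e.reg .rsp - 2920 := by u_omega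
  have a2 : spOf e + 0x7c = e.reg .rsp - 2876 := by u_omega
  have a3 : spOf e + 0x78 = e.reg .rsp - 2880 := by u_omega
  have k1 := hat.slot_n
  have k2 := hat.arg_re
  have k3 := hat.slot_rs
  have k4 := hat.slot_ls
  have k5 := hat.left_val
  unfold slot32 at k1 k3 k4
  rw [a1, hn] at k1
  rw [hre] at k2
  rw [a2, hrs] at k3
  rw [a3, hls] at k4
  have k6 : v.mem.i32 (pLeftOf e) = sint32 lv := by
    rw [Mem.i32_def]
    unfold Mem.u32
    rw [← hlv]
    rfl
  have k7 : stb_vorbis.discard_samples_deferred v.mem (fOf e) = sint32 d := by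
    simp only [vacc, voff]
    rw [Mem.i32_def]
    unfold Mem.u32
    rw [addr_field, ← hd]
    rfl
  refine ⟨k1.symm, k2.symm, k3.symm, k4.symm, k7, ?_, by omega, by omega, by omega, by omega, by omega⟩
  apply sint32_inj lv ls (by omega) (by omega)
  rw [← k6, k5, k4]

/-- **The exit assertion from the RAW reads of the final memory**: the walker's values `D` (the dword at `f + 0x6f8`), `S` (the
slot `[rsp + 0x78]` and the dword at `p_left`), the bytes `first_decode` and `bytes_in_seg`, and the arm that was taken as a case of
`Discard` (lines 3409–3428) for the signed readings. W1, and the four bounds of `left'`, are `Discard.sound` over `tail_facts`.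
Still under `hoff` (see `exit14`). -/
theorem exit14_raw (hat : At13 u₀ others frames len Ar stored room mode ysz e ret v) {w : State} {D S : Nat} {first : Bool}
    (hoff : (e.reg .rsp).toNat + 24 ≤ pLeftOf e)
    (hsame : Mem.SameExcept (spans13 e) v.mem w.mem)
    (hrip : w.rip = Vorbis.L.vorbis_decode_packet_rest.cut41)
    (hrsp : w.reg .rsp = e.reg .rsp - 3000)
    (hcode : Vorbis.CodeOK u₀ w.mem)
    (habi : abiInv w)
    (hr13 : (w.reg .r13).toNat = sbOf e)
    (hbits : Bits (RunBlk Ar len) len w.mem (fOf e))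
    (hD : w.mem.readLE (e.reg .rdi + 1784) 4 = D)
    (hS : w.mem.readLE (e.reg .rsp - 2880) 4 = S)
    (hP : w.mem.readLE (UInt64.ofNat (pLeftOf e)) 4 = S)
    (hF : w.mem.readLE (e.reg .rdi + 1749) 1 = 0)
    (hB : w.mem.readLE (e.reg .rdi + 1748) 1 = 0)
    (hdis : Discard ((nOf v.mem (fOf e) (mOf e) : Nat) : Int) (lsOf e) (rsOf e) (reOf e) first
      (stb_vorbis.discard_samples_deferred v.mem (fOf e)) (sint32 D) (sint32 S)) :
    At14 u₀ others frames len Ar stored room mode ysz e ret w := by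
  obtain ⟨le, hd3, hw2, h0, h1⟩ := tail_facts hat
  obtain ⟨⟨k1, k2⟩, ⟨k3, k4⟩, k5, k6⟩ := hdis.sound hd3 hw2 h0 h1
  have eD : stb_vorbis.discard_samples_deferred w.mem (fOf e) = sint32 D := by
    simp only [vacc, voff]
    rw [Mem.i32_def]
    unfold Mem.u32
    rw [addr_field, ← hD]
    rfl
  have eP : w.mem.i32 (pLeftOf e) = sint32 S := by
    rw [Mem.i32_def]
    unfold Mem.u32
    rw [← hP]
    rfl
  have eF : stb_vorbis.first_decode w.mem (fOf e) = 0 := by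
    simp only [vacc, voff]
    unfold Mem.u8
    rw [addr_field]
    exact hF
  have eB : stb_vorbis.bytes_in_seg w.mem (fOf e) = 0 := by
    simp only [vacc, voff]
    unfold Mem.u8
    rw [addr_field]
    exact hB
  refine exit14 hat hoff hsame hrip hrsp hcode habi hr13 hbits ?_ ?_ ?_ eP k5 k6 k3 k4 eF eB
  · rw [eD]
    exact k1
  · rw [eD]
    exact k2
  · rw [hS]

/-! ### The segment, walked — under the hypothesis the contract lacks -/

set_option maxHeartbeats 40000000 in
/-- **SEGMENT .13 UNDER `hoff`** (`cut39` 0x111939 → `cut41` 0x1119bc): the statement of the unit (`Seg13`, with the hypotheses of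
`Statement` about the code and the four callees) PLUS the one fact `Args` does not give, `hoff : entry rsp + 24 ≤ p_left` (`*p_left`
lies above the two stack arguments). Two walks: up to the call of flush_packet (its precondition is `ReaderPre` from `DecodeInv`,
`Reader.bits_of_window` over the pushed return address); then, from the state flush_packet returned (the slots and fields the tail
loads are transported over its footprint by `u_frame`), all four paths to `cut41` — seven check sites (`*f` and `*p_left` are live
objects), and at each exit `exit14_raw` with the arm's case of `Discard` (`dis_first`, `dis_all`, `dis_part`, `Discard.none`). -/
theorem seg13_of_args_below (Lay : Layout) (hLay : Lay.hi = 0x1000000) (μ : Microarch) (hμ : UserX.MicroOK μ) (u₀ : State)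
    (hcode : HasCodeNat Lay u₀ Vorbis.L.vorbis_decode_packet_rest.entry Vorbis.Code.code_vorbis_decode_packet_rest.nat Vorbis.L.vorbis_decode_packet_rest.size)
    (h_flush : ∀ (others : List Obj) (frames : List (Nat × FrameLayout)) (Blk : Block → Prop) (len : Nat), Calls Lay μ Vorbis.WayInv (Vorbis.conv u₀) Vorbis.L.flush_packet.entry (Vorbis.Spec.flush_packet.spec others frames Blk len))
    (hload1 : Asan.SmallCheck Lay μ Vorbis.WayInv (Vorbis.CodeOK u₀) [.rax, .rdx] 1 Vorbis.L.__asan_load1_noabort.entry)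
    (hstore4 : Asan.SmallCheck Lay μ Vorbis.WayInv (Vorbis.CodeOK u₀) [.rax, .rcx, .rdx] 4 Vorbis.L.__asan_store4_noabort.entry)
    (hload4 : Asan.SmallCheck Lay μ Vorbis.WayInv (Vorbis.CodeOK u₀) [.rax, .rcx, .rdx] 4 Vorbis.L.__asan_load4_noabort.entry)
    (others : List Obj) (frames : List (Nat × FrameLayout)) (len : Nat) (Ar : Arena) (stored room : Int)
    (mode : Nat) (ysz : Nat → Nat) (e : State) (ret : Word) (v : State)
    (hat : At13 u₀ others frames len Ar stored room mode ysz e ret v)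
    (hoff : (e.reg .rsp).toNat + 24 ≤ pLeftOf e) :
    ReachVia Lay μ Vorbis.WayInv v (fun w => At14 u₀ others frames len Ar stored room mode ysz e ret w) := by
  have he := hat.entry
  v_entry he
  have hflush := h_flush others (framesIn frames e) (RunBlk Ar len) len
  have hgeo := geo_of_at13 hat
  obtain ⟨k0, k1, k2, k3, k4, k5, k6, k7⟩ := tail_bounds hat
  have g1 := hgeo.room
  have g2 := hgeo.top
  have g3 : 0x119d40 ≤ (e.reg .rdi).toNat := hgeo.f_lo
  have g4 : (e.reg .rdi).toNat + 1808 ≤ 0xC00000 := hgeo.f_hi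
  have g5 : (e.reg .rdi).toNat + 1808 ≤ 0x700000 ∨ 0x800000 ≤ (e.reg .rdi).toNat := hgeo.f_off
  have g7 := hgeo.p_hi
  clear hgeo
  have w_rip := hat.rip
  have w_rsp : v.reg .rsp = e.reg .rsp - 3000 := hat.rsp
  have c_rsp : v.reg .rsp = e.reg .rsp - 3000 := hat.rsp
  have w_eq : Mem.EqOn Vorbis.L.textLo Vorbis.L.textHi u₀.mem v.mem := hat.code
  have hdf : v.flags .df = false := (show abiInv _ from hat.abi).1
  have hmx : v.mxcsr &&& 0x1F80 = 0x1F80 := (show abiInv _ from hat.abi).2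
  have hsse := Vorbis.sseOK_of_abiInv hat.abi
  have q_f : UInt64.ofNat (v.mem.readLE (e.reg .rsp - 2936) 8) = e.reg .rdi := by
    have h := hat.slot_f
    have ea : spOf e + 0x40 = e.reg .rsp - 2936 := by u_omega
    unfold slot64 at h
    rw [ea] at h
    rw [h]
    exact UInt64.ofNat_toNat
  have q_sb : v.mem.readLE (e.reg .rsp - 3000) 8 = sbOf e := by
    have h := hat.slot_sb0
    have ea : spOf e + 0x0 = e.reg .rsp - 3000 := by u_omega
    unfold slot64 at h
    rw [ea] at h
    exact h
  u_walk hcode [hμ.vendor] until [Vorbis.L.vorbis_decode_packet_rest.cut41] span [Vorbis.L.textLo, Vorbis.L.textHi] side (v_side)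
  case call_inv =>
    v_inv
  case pre_111945 =>
    have hun : ShadowUntouched v.mem s_111945.mem := by v_untouched
    have hsame : Mem.SameExcept [⟨(e.reg .rsp).toNat - 3008, (e.reg .rsp).toNat - 3000⟩] v.mem s_111945.mem := by
      u_same
    refine ⟨⟨?_, hat.pre.1.offText⟩, ?_, ?_⟩
    · have h := hat.shadow.untouched hun
      refine h.lower ?_ ?_ ?_
      · rw [w_rsp]
        u_omega
      · rw [w_rsp]
        u_omega
      · rw [w_rsp]
        u_omega
    · rw [w_rdi]
      exact hat.inv.readerEnv
    · rw [w_rdi]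
      exact Vorbis.Spec.Reader.bits_of_window hat.inv.fb.vorbis.bits hsame (by omega)
  v_after_call w_rsp_111945 w_mem_111945
  have c_rdi : s_111945.reg .rdi = e.reg .rdi := w_rdi_111945
  simp only [c_rdi] at w_same
  have hpost : FlushPost (RunBlk Ar len) len (s_111945.reg .rdi).toNat s_111945 s_111945r := w_post
  rw [c_rdi] at hpost
  -- the slots and fields the tail loads, read in the memory flush_packet returned
  have t_f : UInt64.ofNat (s_111945r.mem.readLE (e.reg .rsp - 2936) 8) = e.reg .rdi := by
    u_frame q_f
  obtain ⟨n2, hn2⟩ : ∃ x : Nat, v.mem.readLE (e.reg .rsp - 2940) 4 = x := ⟨_, rfl⟩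
  obtain ⟨n, hn⟩ : ∃ x : Nat, v.mem.readLE (e.reg .rsp - 2920) 4 = x := ⟨_, rfl⟩
  obtain ⟨re, hre⟩ : ∃ x : Nat, v.mem.readLE (e.reg .rsp + 8) 4 = x := ⟨_, rfl⟩
  obtain ⟨rs, hrs⟩ : ∃ x : Nat, v.mem.readLE (e.reg .rsp - 2876) 4 = x := ⟨_, rfl⟩
  obtain ⟨ls, hls⟩ : ∃ x : Nat, v.mem.readLE (e.reg .rsp - 2880) 4 = x := ⟨_, rfl⟩
  obtain ⟨d, hd⟩ : ∃ x : Nat, v.mem.readLE (e.reg .rdi + 1784) 4 = x := ⟨_, rfl⟩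
  obtain ⟨fd, hfd⟩ : ∃ x : Nat, v.mem.readLE (e.reg .rdi + 1749) 1 = x := ⟨_, rfl⟩
  obtain ⟨lv, hlv⟩ : ∃ x : Nat, v.mem.readLE (UInt64.ofNat (pLeftOf e)) 4 = x := ⟨_, rfl⟩
  have hpl : v.mem.readLE (e.reg .rsp + 16) 8 = pLeftOf e := hat.arg_left
  have t_n2 : s_111945r.mem.readLE (e.reg .rsp - 2940) 4 = n2 := by u_frame hn2
  have t_n : s_111945r.mem.readLE (e.reg .rsp - 2920) 4 = n := by u_frame hn
  have t_re : s_111945r.mem.readLE (e.reg .rsp + 8) 4 = re := by u_frame hre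
  have t_rs : s_111945r.mem.readLE (e.reg .rsp - 2876) 4 = rs := by u_frame hrs
  have t_ls : s_111945r.mem.readLE (e.reg .rsp - 2880) 4 = ls := by u_frame hls
  have t_pl : s_111945r.mem.readLE (e.reg .rsp + 16) 8 = pLeftOf e := by u_frame hpl
  have t_d : s_111945r.mem.readLE (e.reg .rdi + 1784) 4 = d := by u_frame hd
  have t_fd : s_111945r.mem.readLE (e.reg .rdi + 1749) 1 = fd := by u_frame hfd
  have t_lv : s_111945r.mem.readLE (UInt64.ofNat (pLeftOf e)) 4 = lv := by u_frame hlv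
  have t_b : s_111945r.mem.readLE (e.reg .rdi + 1748) 1 = 0 := by
    have h := hpost.drained
    simp only [vacc, voff] at h
    unfold Mem.u8 at h
    rw [addr_field] at h
    exact h
  obtain ⟨vn, vre, vrs, vls, vd, vlv, bn, bre, brs, bls, bd⟩ := vals13 hat hn hre hrs hls hd hlv
  have bfd := Mem.readLE_lt' v.mem (e.reg .rdi + 1749) 1
  rw [hfd] at bfd
  have hb1 : Bits (RunBlk Ar len) len s_111945r.mem (fOf e) := hpost.reader.bits
  have hgeo := geo_of_at13 hat
  obtain ⟨k0, k1, k2, k3, k4, k5, k6, k7⟩ := tail_bounds hat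
  have hun1 : ShadowUntouched v.mem s_111945r.mem := by v_untouched
  have hobj : LiveIn others (framesIn frames e) (e.reg .rdi).toNat Off.sizeof.stb_vorbis := hat.inv.objLive
  have hpobj : LiveIn others (framesIn frames e) (pLeftOf e) 4 :=
    hat.pre.2.2.left_obj.1.mono (framesIn_sub others frames e)
  have hshadow := hat.shadow
  clear q_f q_sb
  u_walk hcode [hμ.vendor] until [Vorbis.L.vorbis_decode_packet_rest.cut41] span [Vorbis.L.textLo, Vorbis.L.textHi] side (v_side)
  case check_111954 =>
    have hun : ShadowUntouched v.mem s_111954.mem := by v_untouched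
    refine hobj.accSmall hshadow hun _ 1 (by decide) (by u_omega) ?_
    simp only [Vorbis.Off.sizeof.stb_vorbis]
    u_omega
  case check_111aa9 =>
    have hun : ShadowUntouched v.mem s_111aa9.mem := by v_untouched
    refine hobj.accSmall hshadow hun _ 4 (by decide) (by u_omega) ?_
    simp only [Vorbis.Off.sizeof.stb_vorbis]
    u_omega
  case check_111b07 =>
    have hun : ShadowUntouched v.mem s_111b07.mem := by v_untouched
    exact hpobj.accSmall hshadow hun _ 4 (by decide) (by u_omega) (by u_omega)
  case check_111adf =>
    have hun : ShadowUntouched v.mem s_111adf.mem := by v_untouched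
    exact hpobj.accSmall hshadow hun _ 4 (by decide) (by u_omega) (by u_omega)
  case check_111973 =>
    have hun : ShadowUntouched v.mem s_111973.mem := by v_untouched
    refine hobj.accSmall hshadow hun _ 4 (by decide) (by u_omega) ?_
    simp only [Vorbis.Off.sizeof.stb_vorbis]
    u_omega
  case check_111991 =>
    have hun : ShadowUntouched v.mem s_111991.mem := by v_untouched
    refine hobj.accSmall hshadow hun _ 4 (by decide) (by u_omega) ?_
    simp only [Vorbis.Off.sizeof.stb_vorbis]
    u_omega
  case check_1119a4 =>
    have hun : ShadowUntouched v.mem s_1119a4.mem := by v_untouched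
    refine hobj.accSmall hshadow hun _ 4 (by decide) (by u_omega) ?_
    simp only [Vorbis.Off.sizeof.stb_vorbis]
    u_omega
  case cont =>
    -- 0x111ab9: `discard_samples_deferred = 0`: nothing is written
    refine ReachVia.done ?_
    have hsame : Mem.SameExcept (spans13 e) v.mem s_111ab9.mem := by
      show Mem.SameExcept [⟨(e.reg .rsp).toNat - 3856, (e.reg .rsp).toNat - 3000⟩,
        ⟨(e.reg .rsp).toNat - 2880, (e.reg .rsp).toNat - 2876⟩,
        ⟨(e.reg .rdi).toNat + 48, (e.reg .rdi).toNat + 56⟩, ⟨(e.reg .rdi).toNat + 84, (e.reg .rdi).toNat + 96⟩,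
        ⟨(e.reg .rdi).toNat + 136, (e.reg .rdi).toNat + 144⟩, ⟨(e.reg .rdi).toNat + 1392, (e.reg .rdi).toNat + 1400⟩,
        ⟨(e.reg .rdi).toNat + 1484, (e.reg .rdi).toNat + 1750⟩, ⟨(e.reg .rdi).toNat + 1752, (e.reg .rdi).toNat + 1764⟩,
        ⟨(e.reg .rdi).toNat + 1772, (e.reg .rdi).toNat + 1788⟩, ⟨pLeftOf e, pLeftOf e + 4⟩] v.mem s_111ab9.mem
      u_same
    have htail : Mem.SameExcept (tail13 e) s_111945r.mem s_111ab9.mem := by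
      show Mem.SameExcept [⟨(e.reg .rsp).toNat - 3008, (e.reg .rsp).toNat - 3000⟩,
        ⟨(e.reg .rsp).toNat - 2880, (e.reg .rsp).toNat - 2876⟩,
        ⟨(e.reg .rdi).toNat + 1392, (e.reg .rdi).toNat + 1400⟩, ⟨(e.reg .rdi).toNat + 1749, (e.reg .rdi).toNat + 1750⟩,
        ⟨(e.reg .rdi).toNat + 1784, (e.reg .rdi).toNat + 1788⟩, ⟨pLeftOf e, pLeftOf e + 4⟩] s_111945r.mem s_111ab9.mem
      rw [w_mem]
      u_same
    have hbits := bits_tail hgeo hb1 htail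
    have hd0 : d = 0 := by omega
    have hfd0 : fd = 0 := by omega
    refine exit14_raw hat hoff hsame w_rip w_rsp w_eq ?_ ?_ hbits (D := d) (S := ls) (first := false) ?_ ?_ ?_ ?_ ?_ ?_
    · v_inv
    · rw [w_r13]
      unfold sbOf
      u_omega
    · rw [w_mem]
      u_read
    · rw [w_mem]
      u_read
    · rw [w_mem, ← vlv]
      u_read
    · rw [w_mem, ← hfd0]
      u_read
    · rw [w_mem]
      u_read
    · rw [vd, vls, hd0]
      exact Discard.none
  case cont =>
    -- 0x111b25: `d < right_start - left_start`: `left_start += d`, `*p_left = left_start`, `d = 0`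
    refine ReachVia.done ?_
    have hsame : Mem.SameExcept (spans13 e) v.mem s_111b25.mem := by
      show Mem.SameExcept [⟨(e.reg .rsp).toNat - 3856, (e.reg .rsp).toNat - 3000⟩,
        ⟨(e.reg .rsp).toNat - 2880, (e.reg .rsp).toNat - 2876⟩,
        ⟨(e.reg .rdi).toNat + 48, (e.reg .rdi).toNat + 56⟩, ⟨(e.reg .rdi).toNat + 84, (e.reg .rdi).toNat + 96⟩,
        ⟨(e.reg .rdi).toNat + 136, (e.reg .rdi).toNat + 144⟩, ⟨(e.reg .rdi).toNat + 1392, (e.reg .rdi).toNat + 1400⟩,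
        ⟨(e.reg .rdi).toNat + 1484, (e.reg .rdi).toNat + 1750⟩, ⟨(e.reg .rdi).toNat + 1752, (e.reg .rdi).toNat + 1764⟩,
        ⟨(e.reg .rdi).toNat + 1772, (e.reg .rdi).toNat + 1788⟩, ⟨pLeftOf e, pLeftOf e + 4⟩] v.mem s_111b25.mem
      u_same
    have htail : Mem.SameExcept (tail13 e) s_111945r.mem s_111b25.mem := by
      show Mem.SameExcept [⟨(e.reg .rsp).toNat - 3008, (e.reg .rsp).toNat - 3000⟩,
        ⟨(e.reg .rsp).toNat - 2880, (e.reg .rsp).toNat - 2876⟩,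
        ⟨(e.reg .rdi).toNat + 1392, (e.reg .rdi).toNat + 1400⟩, ⟨(e.reg .rdi).toNat + 1749, (e.reg .rdi).toNat + 1750⟩,
        ⟨(e.reg .rdi).toNat + 1784, (e.reg .rdi).toNat + 1788⟩, ⟨pLeftOf e, pLeftOf e + 4⟩] s_111945r.mem s_111b25.mem
      rw [w_mem]
      u_same
    have hbits := bits_tail hgeo hb1 htail
    have hfd0 : fd = 0 := by omega
    refine exit14_raw hat hoff hsame w_rip w_rsp w_eq ?_ ?_ hbits (D := 0)
      (S := (BitVec.ofNat 32 ls + BitVec.ofNat 32 d).toNat) (first := false) ?_ ?_ ?_ ?_ ?_ ?_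
    · v_inv
    · rw [w_r13]
      unfold sbOf
      u_omega
    · rw [w_mem]
      u_read
    · rw [w_mem]
      u_read
    · rw [w_mem, ofNat32_toNat_mod]
      u_read
    · rw [w_mem, ← hfd0]
      u_read
    · rw [w_mem]
      u_read
    · exact dis_part d rs ls bd brs bls _ _ _ _ _ vd vrs vls k0 k1 k2 k6 k7 hbr_111ab9 hbr_111acd
  case cont =>
    -- 0x111af2: `d ≥ right_start - left_start`: `d -= right_start - left_start`, `*p_left = left_start = right_start`
    refine ReachVia.done ?_
    have hsame : Mem.SameExcept (spans13 e) v.mem s_111af2.mem := by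
      show Mem.SameExcept [⟨(e.reg .rsp).toNat - 3856, (e.reg .rsp).toNat - 3000⟩,
        ⟨(e.reg .rsp).toNat - 2880, (e.reg .rsp).toNat - 2876⟩,
        ⟨(e.reg .rdi).toNat + 48, (e.reg .rdi).toNat + 56⟩, ⟨(e.reg .rdi).toNat + 84, (e.reg .rdi).toNat + 96⟩,
        ⟨(e.reg .rdi).toNat + 136, (e.reg .rdi).toNat + 144⟩, ⟨(e.reg .rdi).toNat + 1392, (e.reg .rdi).toNat + 1400⟩,
        ⟨(e.reg .rdi).toNat + 1484, (e.reg .rdi).toNat + 1750⟩, ⟨(e.reg .rdi).toNat + 1752, (e.reg .rdi).toNat + 1764⟩,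
        ⟨(e.reg .rdi).toNat + 1772, (e.reg .rdi).toNat + 1788⟩, ⟨pLeftOf e, pLeftOf e + 4⟩] v.mem s_111af2.mem
      u_same
    have htail : Mem.SameExcept (tail13 e) s_111945r.mem s_111af2.mem := by
      show Mem.SameExcept [⟨(e.reg .rsp).toNat - 3008, (e.reg .rsp).toNat - 3000⟩,
        ⟨(e.reg .rsp).toNat - 2880, (e.reg .rsp).toNat - 2876⟩,
        ⟨(e.reg .rdi).toNat + 1392, (e.reg .rdi).toNat + 1400⟩, ⟨(e.reg .rdi).toNat + 1749, (e.reg .rdi).toNat + 1750⟩,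
        ⟨(e.reg .rdi).toNat + 1784, (e.reg .rdi).toNat + 1788⟩, ⟨pLeftOf e, pLeftOf e + 4⟩] s_111945r.mem s_111af2.mem
      rw [w_mem]
      u_same
    have hbits := bits_tail hgeo hb1 htail
    have hfd0 : fd = 0 := by omega
    refine exit14_raw hat hoff hsame w_rip w_rsp w_eq ?_ ?_ hbits
      (D := (BitVec.ofNat 32 d - (BitVec.ofNat 32 rs - BitVec.ofNat 32 ls)).toNat)
      (S := (BitVec.ofNat 32 rs).toNat) (first := false) ?_ ?_ ?_ ?_ ?_ ?_
    · v_inv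
    · rw [w_r13]
      unfold sbOf
      u_omega
    · rw [w_mem]
      u_read
    · rw [w_mem]
      u_read
    · rw [w_mem]
      u_read
    · rw [w_mem, ← hfd0]
      u_read
    · rw [w_mem]
      u_read
    · exact dis_all d rs ls bd brs bls _ _ _ _ _ vd vrs vls k0 k1 k2 k6 k7 hbr_111ab9 hbr_111acd
  case cont =>
    -- 0x1119b4: `first_decode ≠ 0`: `current_loc`, `discard_samples_deferred = n - right_end`, `current_loc_valid`, `first_decode = 0`
    refine ReachVia.done ?_
    have hsame : Mem.SameExcept (spans13 e) v.mem s_1119b4.mem := by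
      show Mem.SameExcept [⟨(e.reg .rsp).toNat - 3856, (e.reg .rsp).toNat - 3000⟩,
        ⟨(e.reg .rsp).toNat - 2880, (e.reg .rsp).toNat - 2876⟩,
        ⟨(e.reg .rdi).toNat + 48, (e.reg .rdi).toNat + 56⟩, ⟨(e.reg .rdi).toNat + 84, (e.reg .rdi).toNat + 96⟩,
        ⟨(e.reg .rdi).toNat + 136, (e.reg .rdi).toNat + 144⟩, ⟨(e.reg .rdi).toNat + 1392, (e.reg .rdi).toNat + 1400⟩,
        ⟨(e.reg .rdi).toNat + 1484, (e.reg .rdi).toNat + 1750⟩, ⟨(e.reg .rdi).toNat + 1752, (e.reg .rdi).toNat + 1764⟩,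
        ⟨(e.reg .rdi).toNat + 1772, (e.reg .rdi).toNat + 1788⟩, ⟨pLeftOf e, pLeftOf e + 4⟩] v.mem s_1119b4.mem
      u_same
    have htail : Mem.SameExcept (tail13 e) s_111945r.mem s_1119b4.mem := by
      show Mem.SameExcept [⟨(e.reg .rsp).toNat - 3008, (e.reg .rsp).toNat - 3000⟩,
        ⟨(e.reg .rsp).toNat - 2880, (e.reg .rsp).toNat - 2876⟩,
        ⟨(e.reg .rdi).toNat + 1392, (e.reg .rdi).toNat + 1400⟩, ⟨(e.reg .rdi).toNat + 1749, (e.reg .rdi).toNat + 1750⟩,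
        ⟨(e.reg .rdi).toNat + 1784, (e.reg .rdi).toNat + 1788⟩, ⟨pLeftOf e, pLeftOf e + 4⟩] s_111945r.mem s_1119b4.mem
      rw [w_mem]
      u_same
    have hbits := bits_tail hgeo hb1 htail
    refine exit14_raw hat hoff hsame w_rip w_rsp w_eq ?_ ?_ hbits
      (D := (BitVec.ofNat 32 n - BitVec.ofNat 32 re).toNat) (S := ls) (first := true) ?_ ?_ ?_ ?_ ?_ ?_
    · v_inv
    · rw [w_r13]
      unfold sbOf
      u_omega
    · rw [w_mem]
      u_read
    · rw [w_mem]
      u_read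
    · rw [w_mem, ← vlv]
      u_read
    · rw [w_mem]
      u_read
    · rw [w_mem]
      u_read
    · exact dis_first n re ls bn bre _ _ _ _ _ (by rw [vn]) vre vls k3 k4 k5

end Vorbis.Spec.vorbis_decode_packet_rest_13
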